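-- pv_equiv track=rewrite | github.com/davidrajones/adventofcode | 2023/14/14b.py | roll_east
-- ===== SOURCE A (Python) =====
-- from functools import cmp_to_key
--
-- def sort_w_e(a, b):
--     (ax, ay) = a
--     (bx, by) = b
--     if ay < by: return -1
--     if ay > by: return 1
--     if ax < bx: return -1
--     if ax > bx: return 1
--     return 0
--
-- def roll_east(rollers, static, data):
--     rollers = sorted(rollers, key=cmp_to_key(sort_w_e), reverse=True)
--     for i in range(len(rollers)):
--         (x,y) = rollers[i]
--         thisy = y
--         while thisy + 1 < len(data[0]):
--             thisy += 1
--             if (x,thisy) in rollers or (x,thisy) in static: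
--                 break
--             y = thisy
--         rollers[i] = (x, y)
--     return rollers
-- ===== SOURCE B (Python) =====
-- # B: group statics by row once, sort rollers descending (y, x), and place each
-- # roller directly at min(width-1, nearest obstacle east - 1) using only the row's
-- # statics and the last roller settled in that row -- no per-cell walk, no list scans.
-- def roll_east(rollers, static, data):
--     width = len(data[0])
--     srows = {}
--     for (sx, sy) in static:
--         srows.setdefault(sx, []).append(sy)
--     last = {}
--     out = []
--     for (x, y) in sorted(rollers, key=lambda p: (p[1], p[0]), reverse=True):
--         cap = width - 1
--         if x in last and last[x] - 1 < cap:
--             cap = last[x] - 1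
--         for s in srows.get(x, []):
--             if s > y and s - 1 < cap:
--                 cap = s - 1
--         ny = cap if cap > y else y
--         last[x] = ny
--         out.append((x, ny))
--     return out
-- ===== Notes on version B (the rewrite author's own statement) =====
-- stated objective: alternative
-- what changed: A walks every roller cell-by-cell, testing each cell for membership in the whole (mutating) roller list and in static; B groups static obstacles by row once and keeps only the last settled roller per row in a dict, placing each roller directly at min(width-1, nearest east obstacle - 1) with no per-cell walk and no whole-list scans (different traversal and state; measured cost similar on the generated inputs).
-- outside the precondition, e.g. on roll_east([], set(), []): A returns [], B raises IndexError
import Mathlib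
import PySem

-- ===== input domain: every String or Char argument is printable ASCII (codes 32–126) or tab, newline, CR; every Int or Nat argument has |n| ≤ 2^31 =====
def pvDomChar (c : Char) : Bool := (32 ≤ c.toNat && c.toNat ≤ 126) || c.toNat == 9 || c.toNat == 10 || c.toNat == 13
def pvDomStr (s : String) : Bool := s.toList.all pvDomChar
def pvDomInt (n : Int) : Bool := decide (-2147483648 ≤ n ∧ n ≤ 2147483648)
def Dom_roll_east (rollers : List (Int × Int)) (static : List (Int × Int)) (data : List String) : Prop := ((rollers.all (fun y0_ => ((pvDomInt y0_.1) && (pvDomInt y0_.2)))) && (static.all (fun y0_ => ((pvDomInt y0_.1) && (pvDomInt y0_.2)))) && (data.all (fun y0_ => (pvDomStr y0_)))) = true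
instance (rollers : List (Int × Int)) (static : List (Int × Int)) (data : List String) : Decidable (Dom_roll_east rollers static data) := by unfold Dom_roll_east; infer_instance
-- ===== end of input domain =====

-- B replaces A's per-cell while-walk with whole-list membership tests by a direct placement
-- from per-row grouped statics plus the last roller settled in the row (same return value).

-- ===== PORT A =====
-- data[0] (len(data[0])) raises IndexError when data = []; that input is excluded by Pre_roll_east.
-- Both Pythons evaluate len(data[0]); the port totalizes it with an arbitrary default for data = [].
def gridWidth (data : List String) : Int :=
  match data with
  | [] => 0
  | d :: _ => PySem.Str.len d

-- the inner `while thisy + 1 < len(data[0])` loop of A, step for step; fuel only bounds the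
-- iteration count (each pass increments thisy by 1, so (w - y).toNat passes always suffice).
def rollWalk (occ S : List (Int × Int)) (w x : Int) : Int → Int → Nat → Int
  | y, _, 0 => y
  | y, thisy, fuel + 1 =>
    if thisy + 1 < w then
      if (x, thisy + 1) ∈ occ ∨ (x, thisy + 1) ∈ S then y
      else rollWalk occ S w x (thisy + 1) (thisy + 1) fuel
    else y

-- the body of A's `for i in range(len(rollers))` loop: read rollers[i], walk east, write back.
def rollEastStepA (S : List (Int × Int)) (w : Int) (rs : List (Int × Int)) (i : Nat) : List (Int × Int) :=
  match rs[i]? with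
  | some (x, y) => rs.set i (x, rollWalk rs S w x y y (w - y).toNat)
  | none => rs

-- sort_w_e compares (y, x) lexicographically, so sorted(rollers, key=cmp_to_key(sort_w_e), reverse=True)
-- is exactly sorted(rollers, key=lambda p: (p[1], p[0]), reverse=True) = PySem.List.sorted2 … true.
def roll_east (rollers : List (Int × Int)) (static : List (Int × Int)) (data : List String) : List (Int × Int) :=
  let w := gridWidth data
  let rs := PySem.List.sorted2 rollers (fun p => p.2) (fun p => p.1) true
  (List.range rs.length).foldl (rollEastStepA static w) rs

-- ===== PORT B =====
-- srows: `srows.setdefault(sx, []).append(sy)` over static, i.e. group the static ys by row.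
def buildSRows (static : List (Int × Int)) : PySem.Dict Int (List Int) :=
  static.foldl (fun d p => d.modify p.1 [] (fun l => l ++ [p.2])) PySem.Dict.empty

-- the body of B's loop over the sorted rollers: cap from width / last settled in the row /
-- the row's statics east of y, then place at max(y, cap).
def rollEastStepB (srows : PySem.Dict Int (List Int)) (w : Int)
    (acc : PySem.Dict Int Int × List (Int × Int)) (p : Int × Int) :
    PySem.Dict Int Int × List (Int × Int) :=
  let x := p.1
  let y := p.2
  let cap0 := w - 1
  let cap1 := match acc.1.get? x with
    | some l => if l - 1 < cap0 then l - 1 else cap0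
    | none => cap0
  let cap2 := (srows.getD x []).foldl (fun c s => if s > y ∧ s - 1 < c then s - 1 else c) cap1
  let ny := if cap2 > y then cap2 else y
  (acc.1.insert x ny, acc.2 ++ [(x, ny)])

def roll_east_alt (rollers : List (Int × Int)) (static : List (Int × Int)) (data : List String) : List (Int × Int) :=
  let w := gridWidth data
  let srows := buildSRows static
  ((PySem.List.sorted2 rollers (fun p => p.2) (fun p => p.1) true).foldl
      (rollEastStepB srows w) (PySem.Dict.empty, [])).2

-- ===== PRECONDITION & SPEC =====
-- data = [] is excluded: there A raises IndexError on len(data[0]) whenever rollers is non-empty;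
-- with rollers = [] A's loop body never runs and it returns [], while B always evaluates len(data[0])
-- and raises, so that corner is excluded too.
def Pre_roll_east (rollers : List (Int × Int)) (static : List (Int × Int)) (data : List String) : Prop := data ≠ []
instance (rollers : List (Int × Int)) (static : List (Int × Int)) (data : List String) : Decidable (Pre_roll_east rollers static data) := by unfold Pre_roll_east; infer_instance
def pvWitness_roll_east : (List (Int × Int)) × (List (Int × Int)) × List String := ([(0, 0), (0, 1)], [(0, 3)], ["....."])

def Spec_roll_east (rollers : List (Int × Int)) (static : List (Int × Int)) (data : List String) (out : List (Int × Int)) : Prop := out = roll_east_alt rollers static data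
instance (rollers : List (Int × Int)) (static : List (Int × Int)) (data : List String) (out : List (Int × Int)) : Decidable (Spec_roll_east rollers static data out) := by unfold Spec_roll_east; infer_instance

-- ===== CLAIM (what is proved, stated in full; the proofs are below) =====
def Claim_equal_roll_east : Prop := ∀ (rollers : List (Int × Int)) (static : List (Int × Int)) (data : List String), Dom_roll_east rollers static data → Pre_roll_east rollers static data → Spec_roll_east rollers static data (roll_east rollers static data)

-- ===== LEMMAS AND PROOFS =====

-- ---- the first blocked cell east of y, and the closed form of the walk ----
def firstB (occ S : List (Int × Int)) (w x y : Int) : Option Int :=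
  ((PySem.List.pyRange (y + 1) w 1).filter (fun t => decide ((x, t) ∈ occ ∨ (x, t) ∈ S))).head?

def target (occ S : List (Int × Int)) (w x y : Int) : Int :=
  match firstB occ S w x y with
  | some t => t - 1
  | none => max y (w - 1)

lemma firstB_top (occ S : List (Int × Int)) (w x y : Int) (h : ¬ y + 1 < w) :
    firstB occ S w x y = none := by
  have : PySem.List.pyRange (y + 1) w 1 = [] := by
    simp [PySem.List.pyRange]; omega
  simp [firstB, this]

lemma target_top (occ S : List (Int × Int)) (w x y : Int) (h : ¬ y + 1 < w) :
    target occ S w x y = y := by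
  rw [target, firstB_top occ S w x y h]
  dsimp only
  omega

lemma target_blocked_head (occ S : List (Int × Int)) (w x y : Int) (hlt : y + 1 < w)
    (hb : (x, y + 1) ∈ occ ∨ (x, y + 1) ∈ S) : target occ S w x y = y := by
  rw [target, firstB, PySem.List.pyRange_one_cons hlt]
  simp [hb]

lemma target_step (occ S : List (Int × Int)) (w x y : Int) (hlt : y + 1 < w)
    (hb : ¬ ((x, y + 1) ∈ occ ∨ (x, y + 1) ∈ S)) :
    target occ S w x y = target occ S w x (y + 1) := by
  have hfb : firstB occ S w x y = firstB occ S w x (y + 1) := by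
    rw [firstB, firstB, PySem.List.pyRange_one_cons hlt]
    simp [hb]
  rw [target, target, hfb]
  cases hfc : firstB occ S w x (y + 1) with
  | some t => rfl
  | none => dsimp only; omega

lemma walk_eq (occ S : List (Int × Int)) (w x : Int) :
    ∀ (fuel : Nat) (y : Int), (w - 1 - y).toNat ≤ fuel →
      rollWalk occ S w x y y fuel = target occ S w x y := by
  intro fuel
  induction fuel with
  | zero =>
    intro y hf
    have : ¬ y + 1 < w := by omega
    rw [rollWalk, target_top occ S w x y this]
  | succ fuel ih =>
    intro y hf
    rw [rollWalk]
    by_cases hlt : y + 1 < w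
    · by_cases hb : (x, y + 1) ∈ occ ∨ (x, y + 1) ∈ S
      · rw [if_pos hlt, if_pos hb, target_blocked_head occ S w x y hlt hb]
      · rw [if_pos hlt, if_neg hb, ih (y + 1) (by omega),
            target_step occ S w x y hlt hb]
    · rw [if_neg hlt, target_top occ S w x y hlt]

-- members of the search range
lemma mem_firstB_range {occ S : List (Int × Int)} {w x y t : Int}
    (h : firstB occ S w x y = some t) :
    y < t ∧ t < w ∧ ((x, t) ∈ occ ∨ (x, t) ∈ S) := by
  rw [firstB] at h
  have hmem := List.mem_of_mem_head? h
  have h1 := (List.mem_filter.mp hmem).1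
  have h2 := (List.mem_filter.mp hmem).2
  have h3 := (PySem.List.mem_pyRange_one).mp h1
  exact ⟨by omega, by omega, by simpa using h2⟩

lemma target_ge_self (occ S : List (Int × Int)) (w x y : Int) : y ≤ target occ S w x y := by
  rw [target]
  cases h : firstB occ S w x y with
  | some t =>
    dsimp only
    have := mem_firstB_range h
    omega
  | none => dsimp only; omega

lemma target_le_max (occ S : List (Int × Int)) (w x y : Int) :
    target occ S w x y ≤ max y (w - 1) := by
  rw [target]
  cases h : firstB occ S w x y with
  | some t =>
    dsimp only
    have := mem_firstB_range h
    omega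
  | none => dsimp only; omega

-- a blocked cell east of y bounds the landing spot
lemma target_le (occ S : List (Int × Int)) (w x : Int) :
    ∀ (y u : Int), y < u → u < w → ((x, u) ∈ occ ∨ (x, u) ∈ S) →
      target occ S w x y ≤ u - 1 := by
  intro y u
  induction hm : (u - y).toNat using Nat.strong_induction_on generalizing y with
  | _ n ih =>
  intro hyu huw hbu
  have hlt : y + 1 < w := by omega
  by_cases hb : (x, y + 1) ∈ occ ∨ (x, y + 1) ∈ S
  · rw [target_blocked_head occ S w x y hlt hb]; omega
  · have hne : u ≠ y + 1 := by rintro rfl; exact hb hbu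
    rw [target_step occ S w x y hlt hb]
    exact ih (u - (y + 1)).toNat (by omega) (y + 1) rfl (by omega) huw hbu

-- a free stretch east of y bounds the landing spot from below
lemma target_ge (occ S : List (Int × Int)) (w x : Int) :
    ∀ (y c : Int), y ≤ c → c ≤ w - 1 →
      (∀ t, y < t → t ≤ c → ¬ ((x, t) ∈ occ ∨ (x, t) ∈ S)) →
      c ≤ target occ S w x y := by
  intro y c
  induction hm : (c - y).toNat using Nat.strong_induction_on generalizing y with
  | _ n ih =>
  intro hyc hcw hfree
  rcases eq_or_lt_of_le hyc with rfl | hlt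
  · exact target_ge_self occ S w x _
  · have hl : y + 1 < w := by omega
    have hb : ¬ ((x, y + 1) ∈ occ ∨ (x, y + 1) ∈ S) := hfree (y + 1) (by omega) (by omega)
    rw [target_step occ S w x y hl hb]
    exact ih (c - (y + 1)).toNat (by omega) (y + 1) rfl (by omega) hcw
      (fun t h1 h2 => hfree t (by omega) h2)

-- ---- the cap-minimising fold of B ----
lemma foldl_cap_spec (y : Int) :
    ∀ (l : List Int) (c0 : Int),
      (l.foldl (fun c s => if s > y ∧ s - 1 < c then s - 1 else c) c0) ≤ c0 ∧
      (∀ s ∈ l, s > y → (l.foldl (fun c s => if s > y ∧ s - 1 < c then s - 1 else c) c0) ≤ s - 1) ∧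
      ((l.foldl (fun c s => if s > y ∧ s - 1 < c then s - 1 else c) c0) = c0 ∨
        ∃ s ∈ l, s > y ∧ (l.foldl (fun c s => if s > y ∧ s - 1 < c then s - 1 else c) c0) = s - 1) := by
  intro l
  induction l with
  | nil => intro c0; simp
  | cons s l ih =>
    intro c0
    simp only [List.foldl_cons]
    by_cases hc : s > y ∧ s - 1 < c0
    · rw [if_pos hc]
      obtain ⟨h1, h2, h3⟩ := ih (s - 1)
      refine ⟨by omega, ?_, ?_⟩
      · intro s' hs' hs'y
        rcases List.mem_cons.mp hs' with rfl | hmem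
        · exact h1
        · exact h2 s' hmem hs'y
      · rcases h3 with h | ⟨s', hmem, hgt, heq⟩
        · exact Or.inr ⟨s, List.mem_cons_self .., hc.1, h⟩
        · exact Or.inr ⟨s', List.mem_cons_of_mem _ hmem, hgt, heq⟩
    · rw [if_neg hc]
      obtain ⟨h1, h2, h3⟩ := ih c0
      refine ⟨h1, ?_, ?_⟩
      · intro s' hs' hs'y
        rcases List.mem_cons.mp hs' with rfl | hmem
        · exact le_trans h1 (by omega)
        · exact h2 s' hmem hs'y
      · rcases h3 with h | ⟨s', hmem, hgt, heq⟩
        · exact Or.inl h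
        · exact Or.inr ⟨s', List.mem_cons_of_mem _ hmem, hgt, heq⟩

-- ---- the static rows dictionary ----
lemma mem_srows (S : List (Int × Int)) (x s : Int) :
    s ∈ (buildSRows S).getD x [] ↔ (x, s) ∈ S := by
  rw [buildSRows, PySem.Dict.getD_foldl_modify_append]
  simp only [PySem.Dict.getD_empty, List.nil_append, List.mem_map, List.mem_filter]
  constructor
  · rintro ⟨⟨px, py⟩, ⟨hp, hx⟩, rfl⟩
    simp only [beq_iff_eq] at hx
    subst hx
    exact hp
  · intro h
    exact ⟨(x, s), ⟨h, by simp⟩, rfl⟩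

-- ---- the loop invariant ----
def RollInv (w : Int) (S proc pend : List (Int × Int)) (last : PySem.Dict Int Int) : Prop :=
  (∀ x l, last.get? x = some l →
      (x, l) ∈ proc ∧
      (w ≤ l + 1 ∨ (x, l + 1) ∈ S ∨ (x, l + 1) ∈ proc) ∧
      (∀ p ∈ proc, p.1 = x → l ≤ p.2)) ∧
  (∀ p ∈ proc, ∃ l, last.get? p.1 = some l) ∧
  (∀ q ∈ pend, ∀ l, last.get? q.1 = some l → q.2 ≤ l)

-- ---- names for B's per-roller computation (defeq to the body of rollEastStepB) ----
def cap1Of (w : Int) (o : Option Int) : Int :=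
  match o with
  | some l => if l - 1 < w - 1 then l - 1 else w - 1
  | none => w - 1

def capB (S : List (Int × Int)) (w x y : Int) (o : Option Int) : Int :=
  ((buildSRows S).getD x []).foldl (fun c s => if s > y ∧ s - 1 < c then s - 1 else c) (cap1Of w o)

def nyB (S : List (Int × Int)) (w x y : Int) (o : Option Int) : Int :=
  if capB S w x y o > y then capB S w x y o else y

-- ---- the heart: on the current roller, A's walk equals B's direct placement ----
lemma step_core (w : Int) (S proc rest : List (Int × Int)) (last : PySem.Dict Int Int)
    (x y : Int)
    (hpw : ∀ q ∈ rest, q.2 ≤ y)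
    (hInv : RollInv w S proc ((x, y) :: rest) last) :
    target (proc ++ (x, y) :: rest) S w x y = nyB S w x y (last.get? x) ∧
    (w ≤ nyB S w x y (last.get? x) + 1 ∨ (x, nyB S w x y (last.get? x) + 1) ∈ S ∨
      (x, nyB S w x y (last.get? x) + 1) ∈ proc) ∧
    (∀ l, last.get? x = some l → nyB S w x y (last.get? x) ≤ l) := by
  set occ := proc ++ (x, y) :: rest with hocc
  set cap1 := cap1Of w (last.get? x) with hcap1def
  set cap2 := capB S w x y (last.get? x) with hcap2def
  set ny := nyB S w x y (last.get? x) with hnydef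
  have hcap2_eq : cap2 = ((buildSRows S).getD x []).foldl
      (fun c s => if s > y ∧ s - 1 < c then s - 1 else c) cap1 := rfl
  have hny_eq : ny = if cap2 > y then cap2 else y := rfl
  obtain ⟨hI1, hI2, hI3⟩ := hInv
  have hcap_spec := foldl_cap_spec y ((buildSRows S).getD x []) cap1
  rw [← hcap2_eq] at hcap_spec
  obtain ⟨hcap_le, hcap_all, hcap_ach⟩ := hcap_spec
  -- basic facts about cap1
  have hcap1_le : cap1 ≤ w - 1 := by
    rw [hcap1def]
    cases last.get? x with
    | some l => simp only [cap1Of]; split_ifs <;> omega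
    | none => simp only [cap1Of]; omega
  have hylast : ∀ l, last.get? x = some l → y ≤ l := fun l hl =>
    hI3 (x, y) (List.mem_cons_self ..) l hl
  have hcap1_lt_last : ∀ l, last.get? x = some l → cap1 ≤ l - 1 := by
    intro l hl
    rw [hcap1def, hl]
    simp only [cap1Of]; split_ifs <;> omega
  have hnone_no_proc : last.get? x = none → ∀ t, (x, t) ∈ proc → False := by
    intro hn t hmem
    obtain ⟨l, hl⟩ := hI2 (x, t) hmem
    simp only at hl
    rw [hn] at hl; simp at hl
  -- cells strictly between y and cap2 (inclusive) are free in occ ∪ S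
  have hfree : ∀ t, y < t → t ≤ cap2 → ¬ ((x, t) ∈ occ ∨ (x, t) ∈ S) := by
    intro t hyt htc hblk
    rcases hblk with hocc' | hS
    · rcases List.mem_append.mp hocc' with hproc | hcur
      · cases hl : last.get? x with
        | none => exact hnone_no_proc hl t hproc
        | some l =>
          have h1 := (hI1 x l hl).2.2 (x, t) hproc rfl
          have h2 := hcap1_lt_last l hl
          omega
      · rcases List.mem_cons.mp hcur with heq | hrest
        · have : t = y := congrArg Prod.snd heq
          omega
        · have := hpw (x, t) hrest
          simp only at this
          omega
    · have hs : t ∈ (buildSRows S).getD x [] := (mem_srows S x t).mpr hS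
      have := hcap_all t hs hyt
      omega
  have hy_ny : y ≤ ny := by
    rw [hny_eq]; split_ifs <;> omega
  -- blockedNext / upper bound, assuming ny + 1 < w
  have hblocked : w ≤ ny + 1 ∨ (x, ny + 1) ∈ S ∨ (x, ny + 1) ∈ proc := by
    by_cases hw : w ≤ ny + 1
    · exact Or.inl hw
    · right
      have hnyw : ny + 1 < w := by omega
      rcases hcap_ach with hach | ⟨s, hs, hsy, hseq⟩
      · -- cap2 = cap1
        cases hl : last.get? x with
        | none =>
          exfalso
          have hc1 : cap1 = w - 1 := by rw [hcap1def, hl]; rfl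
          have hny : ny = if cap2 > y then cap2 else y := hny_eq
          split_ifs at hny <;> omega
        | some l =>
          have hyl := hylast l hl
          have hc1 : cap1 = if l - 1 < w - 1 then l - 1 else w - 1 := by
            rw [hcap1def, hl]; rfl
          have hmemproc := (hI1 x l hl).1
          have hny : ny = if cap2 > y then cap2 else y := hny_eq
          split_ifs at hc1 with hlw
          · -- cap1 = l - 1
            split_ifs at hny with hc2y
            · -- ny = cap2 = l - 1, so ny + 1 = l ∈ proc
              right
              have : ny + 1 = l := by omega
              rwa [this]
            · -- ny = y, cap2 = l - 1 ≤ y, y ≤ l so l ∈ {y, y+1}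
              rcases (by omega : l = y ∨ l = y + 1) with hly | hly
              · -- l = y: use the stored blockedNext fact
                have hbn := (hI1 x l hl).2.1
                rcases hbn with h | h | h
                · omega
                · exact Or.inl (by rwa [show ny + 1 = l + 1 by omega])
                · exact Or.inr (by rwa [show ny + 1 = l + 1 by omega])
              · right
                rw [show ny + 1 = l by omega]
                exact hmemproc
          · -- cap1 = w - 1
            exfalso
            split_ifs at hny <;> omega
      · -- cap2 = s - 1 for a static s in this row, s > y
        left
        have hSs : (x, s) ∈ S := (mem_srows S x s).mp hs
        have hny : ny = if cap2 > y then cap2 else y := hny_eq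
        split_ifs at hny with hc2y
        · rwa [show ny + 1 = s by omega]
        · rwa [show ny + 1 = s by omega]
  refine ⟨?_, hblocked, fun l hl => ?_⟩
  · -- target = ny
    apply le_antisymm
    · -- target ≤ ny
      by_cases hw : w ≤ ny + 1
      · have h1 := target_le_max occ S w x y
        have hcm : cap2 ≤ w - 1 := le_trans hcap_le hcap1_le
        have hny : ny = if cap2 > y then cap2 else y := hny_eq
        split_ifs at hny <;> omega
      · rcases hblocked with h | hS | hproc
        · omega
        · have := target_le occ S w x y (ny + 1) (by omega) (by omega) (Or.inr hS)
          omega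
        · have := target_le occ S w x y (ny + 1) (by omega) (by omega)
            (Or.inl (List.mem_append_left _ hproc))
          omega
    · -- ny ≤ target
      rw [hny_eq]
      split_ifs with hc2y
      · exact target_ge occ S w x y cap2 (by omega) (le_trans hcap_le hcap1_le) hfree
      · exact target_ge_self occ S w x y
  · -- ny ≤ l for the previous settle l of this row
    have h1 := hcap1_lt_last l hl
    have h2 := hylast l hl
    have hny : ny = if cap2 > y then cap2 else y := hny_eq
    split_ifs at hny <;> omega

-- ---- the invariant survives a step ----
lemma inv_step (w : Int) (S proc rest : List (Int × Int)) (last : PySem.Dict Int Int)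
    (x y ny : Int)
    (hpw : ∀ q ∈ rest, q.2 ≤ y)
    (hInv : RollInv w S proc ((x, y) :: rest) last)
    (hy_ny : y ≤ ny)
    (hblocked : w ≤ ny + 1 ∨ (x, ny + 1) ∈ S ∨ (x, ny + 1) ∈ proc)
    (hle : ∀ l, last.get? x = some l → ny ≤ l) :
    RollInv w S (proc ++ [(x, ny)]) rest (last.insert x ny) := by
  obtain ⟨hI1, hI2, hI3⟩ := hInv
  refine ⟨?_, ?_, ?_⟩
  · intro x' l' hl'
    rw [PySem.Dict.get?_insert] at hl'
    split_ifs at hl' with hx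
    · subst hx
      injection hl' with hl'
      subst hl'
      refine ⟨List.mem_append_right _ (List.mem_singleton.mpr rfl), ?_, ?_⟩
      · rcases hblocked with h | h | h
        · exact Or.inl h
        · exact Or.inr (Or.inl h)
        · exact Or.inr (Or.inr (List.mem_append_left _ h))
      · intro p hp hpx
        rcases List.mem_append.mp hp with hp | hp
        · obtain ⟨l0, hl0⟩ := hI2 p hp
          rw [hpx] at hl0
          have := (hI1 x' l0 hl0).2.2 p hp hpx
          have := hle l0 hl0
          omega
        · have : p = (x', ny) := List.mem_singleton.mp hp
          subst this
          exact le_refl _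
    · obtain ⟨ha, hb, hc⟩ := hI1 x' l' hl'
      refine ⟨List.mem_append_left _ ha, ?_, ?_⟩
      · rcases hb with h | h | h
        · exact Or.inl h
        · exact Or.inr (Or.inl h)
        · exact Or.inr (Or.inr (List.mem_append_left _ h))
      · intro p hp hpx
        rcases List.mem_append.mp hp with hp | hp
        · exact hc p hp hpx
        · have : p = (x, ny) := List.mem_singleton.mp hp
          subst this
          exact absurd hpx.symm hx
  · intro p hp
    rcases List.mem_append.mp hp with hp | hp
    · obtain ⟨l0, hl0⟩ := hI2 p hp
      rw [PySem.Dict.get?_insert]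
      split_ifs with hx
      · exact ⟨ny, rfl⟩
      · exact ⟨l0, hl0⟩
    · have : p = (x, ny) := List.mem_singleton.mp hp
      subst this
      rw [PySem.Dict.get?_insert]
      simp
  · intro q hq l hl
    rw [PySem.Dict.get?_insert] at hl
    split_ifs at hl with hx
    · injection hl with hl
      have := hpw q hq
      omega
    · exact hI3 q (List.mem_cons_of_mem _ hq) l hl

-- ---- the main simulation: A's index loop with in-place writes vs B's fold ----
lemma main_sim (w : Int) (S : List (Int × Int)) :
    ∀ (pend proc : List (Int × Int)) (last : PySem.Dict Int Int),
      pend.Pairwise (fun a b => b.2 ≤ a.2) →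
      RollInv w S proc pend last →
      (List.range' proc.length pend.length).foldl (rollEastStepA S w) (proc ++ pend)
        = (pend.foldl (rollEastStepB (buildSRows S) w) (last, proc)).2 := by
  intro pend
  induction pend with
  | nil => intro proc last _ _; simp
  | cons hd rest ih =>
    intro proc last hpair hInv
    obtain ⟨x, y⟩ := hd
    have hpw : ∀ q ∈ rest, q.2 ≤ y := fun q hq => (List.pairwise_cons.mp hpair).1 q hq
    obtain ⟨htarget, hblocked, hle⟩ := step_core w S proc rest last x y hpw hInv
    set ny := nyB S w x y (last.get? x) with hnydef
    have hy_ny : y ≤ ny := by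
      rw [hnydef]
      show y ≤ if capB S w x y (last.get? x) > y then capB S w x y (last.get? x) else y
      split_ifs <;> omega
    -- A's step at index proc.length
    have hlen : (List.range' proc.length (rest.length + 1)) =
        proc.length :: List.range' (proc.length + 1) rest.length := List.range'_succ
    have hget : (proc ++ (x, y) :: rest)[proc.length]? = some (x, y) := by
      rw [List.getElem?_append_right (le_refl _)]
      simp
    have hwalk : rollWalk (proc ++ (x, y) :: rest) S w x y y (w - y).toNat = ny := by
      rw [walk_eq (proc ++ (x, y) :: rest) S w x ((w - y).toNat) y (by omega)]
      exact htarget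
    have hset : (proc ++ (x, y) :: rest).set proc.length (x, ny) = proc ++ (x, ny) :: rest := by
      rw [List.set_append]
      simp
    have hstepA : rollEastStepA S w (proc ++ (x, y) :: rest) proc.length
        = proc ++ (x, ny) :: rest := by
      rw [rollEastStepA, hget]
      dsimp only
      rw [hwalk, hset]
    have hstepB : rollEastStepB (buildSRows S) w (last, proc) (x, y)
        = (last.insert x ny, proc ++ [(x, ny)]) := by
      rfl
    calc (List.range' proc.length ((x, y) :: rest).length).foldl (rollEastStepA S w)
          (proc ++ (x, y) :: rest)
        = (List.range' (proc.length + 1) rest.length).foldl (rollEastStepA S w)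
          (proc ++ (x, ny) :: rest) := by
          rw [List.length_cons, hlen, List.foldl_cons, hstepA]
      _ = (List.range' (proc ++ [(x, ny)]).length rest.length).foldl (rollEastStepA S w)
          ((proc ++ [(x, ny)]) ++ rest) := by
          rw [List.length_append, List.length_singleton, List.append_assoc,
            List.singleton_append]
      _ = (rest.foldl (rollEastStepB (buildSRows S) w) (last.insert x ny, proc ++ [(x, ny)])).2 := by
          exact ih (proc ++ [(x, ny)]) (last.insert x ny) (List.pairwise_cons.mp hpair).2
            (inv_step w S proc rest last x y ny hpw hInv hy_ny hblocked hle)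
      _ = (((x, y) :: rest).foldl (rollEastStepB (buildSRows S) w) (last, proc)).2 := by
          rw [List.foldl_cons, hstepB]

-- ---- the sorted roller list is descending in y ----
lemma pairwise_insertBy_of {α : Type} (before : α → α → Bool)
    (hasym : ∀ a b, before a b = true → before b a = false)
    (htrans : ∀ a b c, before a b = true → before b c = true → before a c = true)
    (x : α) (l : List α) (h : l.Pairwise (fun a b => before b a = false)) :
    (PySem.List.insertBy before x l).Pairwise (fun a b => before b a = false) := by
  induction l with
  | nil => simp [PySem.List.insertBy]
  | cons y ys ih =>
    rw [PySem.List.insertBy]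
    obtain ⟨hhead, htail⟩ := List.pairwise_cons.mp h
    split_ifs with hxy
    · refine List.pairwise_cons.mpr ⟨?_, h⟩
      intro z hz
      rcases List.mem_cons.mp hz with rfl | hzys
      · exact hasym _ _ hxy
      · by_contra hzx
        have hzx' : before z x = true := by
          cases hb : before z x
          · exact absurd hb hzx
          · rfl
        have := htrans z x y hzx' hxy
        rw [hhead z hzys] at this
        exact Bool.noConfusion this
    · refine List.pairwise_cons.mpr ⟨?_, ih htail⟩
      intro z hz
      rcases (PySem.List.mem_insertBy before x z ys).mp hz with rfl | hzys
      · exact Bool.eq_false_iff.mpr hxy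
      · exact hhead z hzys

lemma pairwise_foldl_insertBy (before : Int × Int → Int × Int → Bool)
    (hasym : ∀ a b, before a b = true → before b a = false)
    (htrans : ∀ a b c, before a b = true → before b c = true → before a c = true) :
    ∀ (xs acc : List (Int × Int)), acc.Pairwise (fun a b => before b a = false) →
      (xs.foldl (fun acc x => PySem.List.insertBy before x acc) acc).Pairwise
        (fun a b => before b a = false) := by
  intro xs
  induction xs with
  | nil => intro acc h; exact h
  | cons x xs ih =>
    intro acc h
    exact ih _ (pairwise_insertBy_of before hasym htrans x acc h)

lemma sorted2_desc (rollers : List (Int × Int)) :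
    (PySem.List.sorted2 rollers (fun p => p.2) (fun p => p.1) true).Pairwise
      (fun a b => b.2 ≤ a.2) := by
  have heq : PySem.List.sorted2 rollers (fun p : Int × Int => p.2) (fun p => p.1) true
      = rollers.foldl (fun acc x => PySem.List.insertBy
          (fun a b => decide (b.2 < a.2) || (!decide (a.2 < b.2) && decide (b.1 < a.1))) x acc) [] := rfl
  rw [heq]
  have h := pairwise_foldl_insertBy
    (fun a b => decide (b.2 < a.2) || (!decide (a.2 < b.2) && decide (b.1 < a.1)))
    (by intro a b hab
        simp only [Bool.or_eq_true, Bool.and_eq_true, Bool.not_eq_true',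
          decide_eq_true_eq, decide_eq_false_iff_not] at hab
        simp only [Bool.or_eq_false_iff, Bool.and_eq_false_iff, Bool.not_eq_false',
          decide_eq_true_eq, decide_eq_false_iff_not]
        omega)
    (by intro a b c hab hbc
        simp only [Bool.or_eq_true, Bool.and_eq_true, Bool.not_eq_true',
          decide_eq_true_eq, decide_eq_false_iff_not] at hab hbc ⊢
        omega)
    rollers [] (List.Pairwise.nil)
  refine h.imp ?_
  intro a b hab
  simp only [Bool.or_eq_false_iff, Bool.and_eq_false_iff, Bool.not_eq_false',
    decide_eq_true_eq, decide_eq_false_iff_not] at hab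
  omega

-- ===== VERDICT (by name: the statement is the Claim_ definition above) =====
theorem roll_east_spec : Claim_equal_roll_east := by
  intro rollers static data _ _
  unfold Spec_roll_east roll_east roll_east_alt
  have h := main_sim (gridWidth data) static
    (PySem.List.sorted2 rollers (fun p => p.2) (fun p => p.1) true) [] PySem.Dict.empty
    (sorted2_desc rollers)
    (by refine ⟨?_, ?_, ?_⟩
        · intro x l hl; rw [PySem.Dict.get?_empty] at hl; simp at hl
        · intro p hp; exact absurd hp (List.not_mem_nil)
        · intro q hq l hl; rw [PySem.Dict.get?_empty] at hl; simp at hl)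
  simpa [List.range_eq_range'] using h
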